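-- pv_equiv track=rewrite | github.com/HarshVardhansinghChauhan4542/Climitra | src/ui/layout.py | _get_important_columns
-- ===== SOURCE A (Python) =====
-- def _get_important_columns(data_source: str, all_columns: list) -> list:
--     """Determine important columns to show by default for each data source"""
--     important_cols = []
--
--     if data_source in ["Steel Plants", "Steel Plants with BF"]:
--         # Steel plants - show only essential details
--         steel_plant_cols = [
--             "Plant Name", "State", "District", "Capacity", "Operational"
--         ]
--         important_cols = [col for col in steel_plant_cols if col in all_columns]
--
--         # If essential columns not found, try alternatives
--         if not important_cols:
--             steel_plant_alternatives = [
--                 "Plant", "Name", "State", "District", "Capacity",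
--                 "Operational Status", "Status"
--             ]
--             important_cols = [col for col in steel_plant_alternatives if col in all_columns]
--
--     elif data_source == "Rice Mills":
--         # Rice mills - show only essential details
--         rice_mills_cols = [
--             "Name", "State", "District", "Company"
--         ]
--         important_cols = [col for col in rice_mills_cols if col in all_columns]
--
--         # If essential columns not found, try alternatives
--         if not important_cols:
--             rice_mills_alternatives = [
--                 "Company", "Location", "Type"
--             ]
--             important_cols = [col for col in rice_mills_alternatives if col in all_columns]
--
--     elif data_source == "Geocoded Companies":
--         # Geocoded companies - show only essential details
--         geocoded_cols = [
--             "Company", "State", "District", "City"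
--         ]
--         important_cols = [col for col in geocoded_cols if col in all_columns]
--
--         # If essential columns not found, try alternatives
--         if not important_cols:
--             geocoded_alternatives = [
--                 "Name", "latitude", "longitude"
--             ]
--             important_cols = [col for col in geocoded_alternatives if col in all_columns]
--
--     # If no important columns found, show first 4 columns (more focused)
--     if not important_cols:
--         important_cols = all_columns[:4]
--
--     return important_cols
-- ===== SOURCE B (Python) =====
-- def _get_important_columns(data_source: str, all_columns: list) -> list:
--     # Single pass over the data: build inverted rank indexes for the two candidate
--     # tiers, collect the ranks present in all_columns in one scan, then rebuild the
--     # result from the sorted ranks (objective: alternative decomposition).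
--     if data_source in ("Steel Plants", "Steel Plants with BF"):
--         primary = ["Plant Name", "State", "District", "Capacity", "Operational"]
--         alternative = ["Plant", "Name", "State", "District", "Capacity",
--                        "Operational Status", "Status"]
--     elif data_source == "Rice Mills":
--         primary = ["Name", "State", "District", "Company"]
--         alternative = ["Company", "Location", "Type"]
--     elif data_source == "Geocoded Companies":
--         primary = ["Company", "State", "District", "City"]
--         alternative = ["Name", "latitude", "longitude"]
--     else:
--         primary, alternative = [], []
--     rank0 = {name: i for i, name in enumerate(primary)}
--     rank1 = {name: i for i, name in enumerate(alternative)}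
--     hits0, hits1 = set(), set()
--     for col in all_columns:
--         if col in rank0:
--             hits0.add(rank0[col])
--         if col in rank1:
--             hits1.add(rank1[col])
--     if hits0:
--         return [primary[i] for i in sorted(hits0)]
--     if hits1:
--         return [alternative[i] for i in sorted(hits1)]
--     return all_columns[:4]
-- ===== Notes on version B (the rewrite author's own statement) =====
-- stated objective: alternative
-- what changed: Instead of filtering each candidate list by repeated membership scans of all_columns, B builds inverted rank indexes (name -> position) for the two candidate tiers, collects in ONE pass over all_columns the set of ranks present, and reconstructs the answer by indexing the candidate list at the sorted ranks, falling back to all_columns[:4].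
import Mathlib
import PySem

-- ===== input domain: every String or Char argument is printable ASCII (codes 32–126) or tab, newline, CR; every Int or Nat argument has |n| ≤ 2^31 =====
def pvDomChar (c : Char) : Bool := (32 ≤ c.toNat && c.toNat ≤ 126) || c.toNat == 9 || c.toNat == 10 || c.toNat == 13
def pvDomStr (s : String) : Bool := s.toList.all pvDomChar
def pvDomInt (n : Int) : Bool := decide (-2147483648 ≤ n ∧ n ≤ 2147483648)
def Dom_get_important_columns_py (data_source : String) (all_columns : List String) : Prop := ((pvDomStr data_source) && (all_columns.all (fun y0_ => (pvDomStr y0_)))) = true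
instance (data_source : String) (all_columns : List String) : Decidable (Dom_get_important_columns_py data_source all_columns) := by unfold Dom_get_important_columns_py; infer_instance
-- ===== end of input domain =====

-- B replaces A's per-candidate membership filters by one pass over all_columns with
-- inverted rank indexes, rebuilding the result from the sorted ranks (objective: alternative).

-- ===== PORT A =====
def get_important_columns_py (data_source : String) (all_columns : List String) : List String :=
  let important_cols : List String := []
  let important_cols :=
    if (["Steel Plants", "Steel Plants with BF"] : List String).contains data_source then
      let steel_plant_cols : List String :=
        ["Plant Name", "State", "District", "Capacity", "Operational"]
      let important_cols := steel_plant_cols.filter (fun col => all_columns.contains col)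
      if important_cols = [] then
        let steel_plant_alternatives : List String :=
          ["Plant", "Name", "State", "District", "Capacity", "Operational Status", "Status"]
        steel_plant_alternatives.filter (fun col => all_columns.contains col)
      else important_cols
    else if data_source = "Rice Mills" then
      let rice_mills_cols : List String := ["Name", "State", "District", "Company"]
      let important_cols := rice_mills_cols.filter (fun col => all_columns.contains col)
      if important_cols = [] then
        let rice_mills_alternatives : List String := ["Company", "Location", "Type"]
        rice_mills_alternatives.filter (fun col => all_columns.contains col)
      else important_cols
    else if data_source = "Geocoded Companies" then
      let geocoded_cols : List String := ["Company", "State", "District", "City"]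
      let important_cols := geocoded_cols.filter (fun col => all_columns.contains col)
      if important_cols = [] then
        let geocoded_alternatives : List String := ["Name", "latitude", "longitude"]
        geocoded_alternatives.filter (fun col => all_columns.contains col)
      else important_cols
    else important_cols
  if important_cols = [] then PySem.List.slice all_columns none (some 4) else important_cols

-- ===== PORT B =====
-- Source B's '{name: i for i, name in enumerate(cand)}' (the inverted rank index)
def pvRank (cand : List String) : PySem.Dict String Int :=
  PySem.Dict.ofList ((PySem.List.enumerate cand).map (fun p => (p.2, p.1)))

def get_important_columns_py_alt (data_source : String) (all_columns : List String) : List String :=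
  let tiers : List String × List String :=
    if data_source = "Steel Plants" ∨ data_source = "Steel Plants with BF" then
      (["Plant Name", "State", "District", "Capacity", "Operational"],
       ["Plant", "Name", "State", "District", "Capacity", "Operational Status", "Status"])
    else if data_source = "Rice Mills" then
      (["Name", "State", "District", "Company"], ["Company", "Location", "Type"])
    else if data_source = "Geocoded Companies" then
      (["Company", "State", "District", "City"], ["Name", "latitude", "longitude"])
    else ([], [])
  let primary := tiers.1
  let alternative := tiers.2
  let rank0 := pvRank primary
  let rank1 := pvRank alternative
  -- 'for col in all_columns: if col in rank0: hits0.add(rank0[col]); if col in rank1: …'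
  let hits : PySem.Set Int × PySem.Set Int :=
    all_columns.foldl (fun h col =>
      (match rank0.get? col with | some i => PySem.Set.add h.1 i | none => h.1,
       match rank1.get? col with | some i => PySem.Set.add h.2 i | none => h.2))
      (PySem.Set.empty, PySem.Set.empty)
  if hits.1 ≠ [] then
    (PySem.List.sorted hits.1 (fun x => x)).map (fun i => PySem.List.pyGetD primary i "")
  else if hits.2 ≠ [] then
    (PySem.List.sorted hits.2 (fun x => x)).map (fun i => PySem.List.pyGetD alternative i "")
  else PySem.List.slice all_columns none (some 4)

-- ===== PRECONDITION & SPEC =====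
def Spec_get_important_columns_py (data_source : String) (all_columns : List String) (out : List String) : Prop := out = get_important_columns_py_alt data_source all_columns
instance (data_source : String) (all_columns : List String) (out : List String) : Decidable (Spec_get_important_columns_py data_source all_columns out) := by unfold Spec_get_important_columns_py; infer_instance

-- ===== CLAIM (what is proved, stated in full; the proofs are below) =====
def Claim_equal_get_important_columns_py : Prop := ∀ (data_source : String) (all_columns : List String), Dom_get_important_columns_py data_source all_columns → Spec_get_important_columns_py data_source all_columns (get_important_columns_py data_source all_columns)

-- ===== LEMMAS AND PROOFS =====

-- B's hits fold for one tier, named for the lemmas below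
def pvHits (cand ac : List String) : PySem.Set Int :=
  ac.foldl (fun s col =>
    match (pvRank cand).get? col with | some i => PySem.Set.add s i | none => s) PySem.Set.empty

theorem pvRank_items (cand : List String) (hnd : cand.Nodup) :
    (pvRank cand).items = (PySem.List.enumerate cand).map (fun p => (p.2, p.1)) := by
  unfold pvRank PySem.Dict.ofList PySem.Dict.update
  rw [PySem.Dict.items_foldl_insert_fresh _ Prod.fst Prod.snd]
  · simp [PySem.Dict.empty, Function.comp_def]
  · intro a _; simp [PySem.Dict.contains_empty]
  · simpa [List.map_map, Function.comp_def, PySem.List.map_snd_enumerate] using hnd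

theorem pvRank_keys_nodup (cand : List String) (hnd : cand.Nodup) :
    (pvRank cand).keys.Nodup := by
  simp only [PySem.Dict.keys, pvRank_items cand hnd, List.map_map]
  simpa [Function.comp_def, PySem.List.map_snd_enumerate] using hnd

-- the inverted rank index of a duplicate-free candidate list, characterized
theorem pvRank_get? (cand : List String) (hnd : cand.Nodup) (col : String) (i : Int) :
    (pvRank cand).get? col = some i ↔
      ∃ (k : Nat) (h : k < cand.length), i = (k : Int) ∧ cand[k] = col := by
  rw [PySem.Dict.get?_eq_some_iff_mem_items _ _ _ (pvRank_keys_nodup cand hnd),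
      pvRank_items cand hnd]
  simp only [List.mem_map, PySem.List.mem_enumerate_iff]
  constructor
  · rintro ⟨p, ⟨k, h, rfl⟩, hp⟩
    simp at hp
    exact ⟨k, h, hp.2.symm, hp.1⟩
  · rintro ⟨k, h, rfl, hc⟩
    exact ⟨(k, cand[k]), ⟨k, h, by simp⟩, by simp [hc]⟩

theorem pvHits_foldl_mem (cand ac : List String) (s : PySem.Set Int) (i : Int) :
    i ∈ ac.foldl (fun s col =>
      match (pvRank cand).get? col with | some j => PySem.Set.add s j | none => s) s ↔
    i ∈ s ∨ ∃ col ∈ ac, (pvRank cand).get? col = some i := by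
  induction ac generalizing s with
  | nil => simp
  | cons c t ih =>
    simp only [List.foldl_cons, ih, List.mem_cons]
    cases hg : (pvRank cand).get? c with
    | none => simp [hg]
    | some j =>
      simp only [PySem.Set.mem_add]
      constructor
      · rintro ((h | rfl) | h)
        · exact Or.inl h
        · exact Or.inr ⟨c, Or.inl rfl, hg⟩
        · rcases h with ⟨col, hc, he⟩; exact Or.inr ⟨col, Or.inr hc, he⟩
      · rintro (h | ⟨col, (rfl | hc), he⟩)
        · exact Or.inl (Or.inl h)
        · exact Or.inl (Or.inr (by rw [hg] at he; exact (Option.some_inj.mp he).symm))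
        · exact Or.inr ⟨col, hc, he⟩

theorem pvHits_mem (cand : List String) (hnd : cand.Nodup) (ac : List String) (i : Int) :
    i ∈ pvHits cand ac ↔
      ∃ (k : Nat) (h : k < cand.length), i = (k : Int) ∧ ac.contains cand[k] := by
  unfold pvHits
  rw [pvHits_foldl_mem]
  simp only [PySem.Set.empty, List.not_mem_nil, false_or]
  constructor
  · rintro ⟨col, hc, he⟩
    rcases (pvRank_get? cand hnd col i).mp he with ⟨k, h, rfl, rfl⟩
    exact ⟨k, h, rfl, by simpa using hc⟩
  · rintro ⟨k, h, rfl, hc⟩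
    exact ⟨cand[k], by simpa using hc, (pvRank_get? cand hnd cand[k] k).mpr ⟨k, h, rfl, rfl⟩⟩

theorem pvHits_foldl_nodup (cand ac : List String) (s : PySem.Set Int) (hs : s.Nodup) :
    (ac.foldl (fun s col =>
      match (pvRank cand).get? col with | some j => PySem.Set.add s j | none => s) s).Nodup := by
  induction ac generalizing s with
  | nil => exact hs
  | cons c t ih =>
    simp only [List.foldl_cons]
    cases hg : (pvRank cand).get? c with
    | none => simp only [hg]; exact ih _ hs
    | some j => simp only [hg]; exact ih _ (PySem.Set.nodup_add _ _ hs)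

theorem pvHits_nodup (cand ac : List String) : (pvHits cand ac).Nodup :=
  pvHits_foldl_nodup cand ac _ (by simp [PySem.Set.empty])

theorem pv_filter_range (p : String → Bool) (cand : List String) :
    ((List.range cand.length).filter (fun k => p (cand.getD k ""))).map
        (fun k => cand.getD k "")
      = cand.filter p := by
  induction cand with
  | nil => simp
  | cons x xs ih =>
    rw [List.length_cons, List.range_succ_eq_map]
    simp only [List.filter_cons, List.getD_cons_zero, List.filter_map]
    by_cases hp : p x <;>
      · simp only [List.getD] at ih
        simp [hp, Function.comp_def, List.getD, ih]

theorem pv_sorted_hits (cand ac : List String) (hnd : cand.Nodup) :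
    PySem.List.sorted (pvHits cand ac) (fun x => x)
      = ((List.range cand.length).filter
          (fun k => ac.contains (cand.getD k ""))).map (fun k : Nat => (k : Int)) := by
  apply PySem.List.sorted_eq_of_perm_of_pairwise_lt
  · rw [List.perm_ext_iff_of_nodup]
    · intro a
      rw [pvHits_mem cand hnd ac a]
      simp only [List.mem_map, List.mem_filter, List.mem_range]
      constructor
      · rintro ⟨k, ⟨hk, hc⟩, rfl⟩
        exact ⟨k, hk, rfl, by rwa [List.getD_eq_getElem _ _ hk] at hc⟩
      · rintro ⟨k, hk, rfl, hc⟩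
        exact ⟨k, ⟨hk, by rwa [List.getD_eq_getElem _ _ hk]⟩, rfl⟩
    · exact (((List.nodup_range).filter _).map (fun a b => by exact_mod_cast id))
    · exact pvHits_nodup cand ac
  · rw [List.pairwise_map]
    exact ((List.pairwise_lt_range).filter _).imp (by intro a b h; exact_mod_cast h)

-- B's reconstruction from sorted ranks equals A's candidate-order filter
theorem pv_main (cand ac : List String) (hnd : cand.Nodup) :
    (PySem.List.sorted (pvHits cand ac) (fun x => x)).map
        (fun i => PySem.List.pyGetD cand i "")
      = cand.filter (fun c => ac.contains c)
    ∧ (pvHits cand ac = [] ↔ cand.filter (fun c => ac.contains c) = []) := by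
  have hmap : (PySem.List.sorted (pvHits cand ac) (fun x => x)).map
        (fun i => PySem.List.pyGetD cand i "")
      = cand.filter (fun c => ac.contains c) := by
    rw [pv_sorted_hits cand ac hnd, List.map_map]
    have : ((fun i => PySem.List.pyGetD cand i "") ∘ fun k : Nat => (k : Int))
        = fun k : Nat => cand.getD k "" := by
      funext k; simp [PySem.List.pyGetD_natCast]
    rw [this, pv_filter_range]
  refine ⟨hmap, ?_⟩
  constructor
  · intro h
    rw [← hmap, ← PySem.List.sorted_eq_nil_iff (pvHits cand ac) (fun x => x) false] at *
    simp [h]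
  · intro h
    rw [← PySem.List.sorted_eq_nil_iff (pvHits cand ac) (fun x => x) false]
    have := hmap
    rw [h] at this
    exact List.map_eq_nil_iff.mp this

-- one named branch step: A's filter-then-fallback equals B's hits machinery for any tier pair
theorem pv_branch (prim alt ac : List String) (hp : prim.Nodup) (ha : alt.Nodup) :
    (if (if prim.filter (fun col => ac.contains col) = []
          then alt.filter (fun col => ac.contains col)
          else prim.filter (fun col => ac.contains col)) = []
      then PySem.List.slice ac none (some 4)
      else (if prim.filter (fun col => ac.contains col) = []
            then alt.filter (fun col => ac.contains col)
            else prim.filter (fun col => ac.contains col)))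
    =
    (if pvHits prim ac ≠ [] then
      (PySem.List.sorted (pvHits prim ac) (fun x => x)).map
        (fun i => PySem.List.pyGetD prim i "")
    else if pvHits alt ac ≠ [] then
      (PySem.List.sorted (pvHits alt ac) (fun x => x)).map
        (fun i => PySem.List.pyGetD alt i "")
    else PySem.List.slice ac none (some 4)) := by
  obtain ⟨hm0, hn0⟩ := pv_main prim ac hp
  obtain ⟨hm1, hn1⟩ := pv_main alt ac ha
  rw [hm0, hm1]
  split_ifs with h1 h2 h3 h4 h5 <;> first | rfl | (exfalso; tauto)

-- the pair fold of B projects to the two single-tier folds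
theorem pv_fold_pair (r0 r1 : List String) (ac : List String) :
    ac.foldl (fun (h : PySem.Set Int × PySem.Set Int) col =>
      (match (pvRank r0).get? col with | some i => PySem.Set.add h.1 i | none => h.1,
       match (pvRank r1).get? col with | some i => PySem.Set.add h.2 i | none => h.2))
      (PySem.Set.empty, PySem.Set.empty) = (pvHits r0 ac, pvHits r1 ac) :=
  PySem.List.foldl_prod_mk
    (fun s col => match (pvRank r0).get? col with | some i => PySem.Set.add s i | none => s)
    (fun s col => match (pvRank r1).get? col with | some i => PySem.Set.add s i | none => s)
    ac PySem.Set.empty PySem.Set.empty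

-- ===== VERDICT (by name: the statement is the Claim_ definition above) =====
theorem get_important_columns_py_spec : Claim_equal_get_important_columns_py := by
  intro data_source all_columns _
  unfold Spec_get_important_columns_py get_important_columns_py get_important_columns_py_alt
  by_cases h1 : data_source = "Steel Plants"
  · subst h1
    simp only [List.contains_eq_mem, String.reduceEq, reduceIte, or_true, true_or, or_false, false_or, or_self]
    rw [pv_fold_pair]
    have h := pv_branch ["Plant Name", "State", "District", "Capacity", "Operational"] ["Plant", "Name", "State", "District", "Capacity", "Operational Status", "Status"] all_columns (by decide) (by decide)
    simp only [List.contains_eq_mem] at h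
    exact h
  by_cases h2 : data_source = "Steel Plants with BF"
  · subst h2
    simp only [List.contains_eq_mem, String.reduceEq, reduceIte, or_true, true_or, or_false, false_or, or_self]
    rw [pv_fold_pair]
    have h := pv_branch ["Plant Name", "State", "District", "Capacity", "Operational"] ["Plant", "Name", "State", "District", "Capacity", "Operational Status", "Status"] all_columns (by decide) (by decide)
    simp only [List.contains_eq_mem] at h
    exact h
  by_cases h3 : data_source = "Rice Mills"
  · subst h3
    simp only [List.contains_eq_mem, String.reduceEq, reduceIte, or_true, true_or, or_false, false_or, or_self]
    rw [pv_fold_pair]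
    have h := pv_branch ["Name", "State", "District", "Company"] ["Company", "Location", "Type"] all_columns (by decide) (by decide)
    simp only [List.contains_eq_mem] at h
    exact h
  by_cases h4 : data_source = "Geocoded Companies"
  · subst h4
    simp only [List.contains_eq_mem, String.reduceEq, reduceIte, or_true, true_or, or_false, false_or, or_self]
    rw [pv_fold_pair]
    have h := pv_branch ["Company", "State", "District", "City"] ["Name", "latitude", "longitude"] all_columns (by decide) (by decide)
    simp only [List.contains_eq_mem] at h
    exact h
  · simp only [List.contains_eq_mem, List.mem_cons, List.not_mem_nil, or_false, h1, h2, h3, h4, if_false, reduceIte, decide_eq_true_eq]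
    rw [pv_fold_pair]
    have h := pv_branch [] [] all_columns (by decide) (by decide)
    simp only [List.contains_eq_mem] at h
    exact h
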